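-- pv_equiv track=rewrite | github.com/amitkumar0206/finops-orchestrator | backend/services/ups_extractor.py | validate_database_engines
-- ===== SOURCE A (Python) =====
-- from typing import List, Optional, Dict, Any, Tuple
--
-- DATABASE_ENGINE_SYNONYMS = {
--     "mysql": "MySQL",
--     "postgres": "PostgreSQL",
--     "postgresql": "PostgreSQL",
--     "aurora": "Aurora",
--     "sql server": "SQL Server",
--     "mssql": "SQL Server",
--     "oracle": "Oracle",
--     "mariadb": "MariaDB",
-- }
--
-- def validate_database_engines(
--     values: Optional[List[str]]
-- ) -> Tuple[Optional[List[str]], List[str]]: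
--     """
--     Validate database engine values against canonical values.
--
--     Returns:
--         Tuple of (valid_values, invalid_values)
--     """
--     if not values:
--         return None, []
--
--     canonical_engines = {
--         "MySQL", "PostgreSQL", "Aurora", "SQL Server",
--         "Oracle", "MariaDB"
--     }
--     valid = []
--     invalid = []
--
--     for value in values:
--         if value in canonical_engines:
--             valid.append(value)
--         elif value.lower() in DATABASE_ENGINE_SYNONYMS:
--             canonical = DATABASE_ENGINE_SYNONYMS[value.lower()]
--             valid.append(canonical)
--         else:
--             invalid.append(value)
--
--     return valid or None, invalid
-- ===== SOURCE B (Python) =====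
-- from typing import List, Optional, Tuple
--
-- DATABASE_ENGINE_SYNONYMS = {
--     "mysql": "MySQL",
--     "postgres": "PostgreSQL",
--     "postgresql": "PostgreSQL",
--     "aurora": "Aurora",
--     "sql server": "SQL Server",
--     "mssql": "SQL Server",
--     "oracle": "Oracle",
--     "mariadb": "MariaDB",
-- }
--
-- def validate_database_engines(values):
--     # Two staged comprehensions over one dict: every canonical name's lowercase
--     # maps to itself in DATABASE_ENGINE_SYNONYMS, so one lowercase lookup decides.
--     if not values:
--         return None, []
--     valid = [DATABASE_ENGINE_SYNONYMS[v.lower()] for v in values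
--              if v.lower() in DATABASE_ENGINE_SYNONYMS]
--     invalid = [v for v in values if v.lower() not in DATABASE_ENGINE_SYNONYMS]
--     return valid or None, invalid
-- ===== Notes on version B (the rewrite author's own statement) =====
-- stated objective: simpler
-- what changed: Replaced A's single loop with a two-list accumulator and a canonical-set branch by two staged comprehensions over one dict: since each canonical engine's lowercase form maps to itself in DATABASE_ENGINE_SYNONYMS, one lowercase lookup classifies each value, and valid/invalid are built as separate filterMap/filter passes.
import Mathlib
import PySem

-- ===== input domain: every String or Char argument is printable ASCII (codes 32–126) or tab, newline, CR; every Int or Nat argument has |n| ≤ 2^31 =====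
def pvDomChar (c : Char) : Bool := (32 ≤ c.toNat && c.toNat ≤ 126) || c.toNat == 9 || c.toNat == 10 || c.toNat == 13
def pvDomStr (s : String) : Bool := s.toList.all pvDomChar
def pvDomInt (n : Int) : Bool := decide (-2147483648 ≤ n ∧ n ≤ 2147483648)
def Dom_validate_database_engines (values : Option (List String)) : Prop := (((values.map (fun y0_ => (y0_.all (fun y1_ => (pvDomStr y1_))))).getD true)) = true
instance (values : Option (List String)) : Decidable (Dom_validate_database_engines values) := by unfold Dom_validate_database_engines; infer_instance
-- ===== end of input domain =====

-- B replaces A's one loop (two-list accumulator + canonical-set branch) by two staged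
-- filterMap/filter passes over one dict, using that each canonical name's lowercase
-- maps to itself in the synonyms dict (objective: simpler).

-- module-level constant shared by both Pythons
def DATABASE_ENGINE_SYNONYMS : PySem.Dict String String := PySem.Dict.ofList
  [("mysql", "MySQL"), ("postgres", "PostgreSQL"), ("postgresql", "PostgreSQL"),
   ("aurora", "Aurora"), ("sql server", "SQL Server"), ("mssql", "SQL Server"),
   ("oracle", "Oracle"), ("mariadb", "MariaDB")]

-- ===== PORT A =====
def canonical_engines : PySem.Set String := PySem.Set.ofList
  ["MySQL", "PostgreSQL", "Aurora", "SQL Server", "Oracle", "MariaDB"]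

-- the body of A's for-loop, accumulating (valid, invalid)
def stepA (acc : List String × List String) (value : String) : List String × List String :=
  if PySem.Set.contains canonical_engines value then (acc.1 ++ [value], acc.2)
  else match PySem.Dict.get? DATABASE_ENGINE_SYNONYMS (PySem.Str.lower value) with
    | some canonical => (acc.1 ++ [canonical], acc.2)
    | none => (acc.1, acc.2 ++ [value])

def validate_database_engines (values : Option (List String)) : Option (List String) × List String :=
  match values with
  | none => (none, [])
  | some vs =>
    if vs.isEmpty then (none, [])
    else
      let p := vs.foldl stepA ([], [])
      ((if p.1.isEmpty then none else some p.1), p.2)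

-- ===== PORT B =====
def validate_database_engines_alt (values : Option (List String)) : Option (List String) × List String :=
  match values with
  | none => (none, [])
  | some vs =>
    if vs.isEmpty then (none, [])
    else
      let valid := vs.filterMap (fun v => PySem.Dict.get? DATABASE_ENGINE_SYNONYMS (PySem.Str.lower v))
      let invalid := vs.filter (fun v => (PySem.Dict.get? DATABASE_ENGINE_SYNONYMS (PySem.Str.lower v)).isNone)
      ((if valid.isEmpty then none else some valid), invalid)

-- ===== PRECONDITION & SPEC =====
def Spec_validate_database_engines (values : Option (List String)) (out : Option (List String) × List String) : Prop := out = validate_database_engines_alt values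
instance (values : Option (List String)) (out : Option (List String) × List String) : Decidable (Spec_validate_database_engines values out) := by unfold Spec_validate_database_engines; infer_instance

-- ===== CLAIM (what is proved, stated in full; the proofs are below) =====
def Claim_equal_validate_database_engines : Prop := ∀ (values : Option (List String)), Dom_validate_database_engines values → Spec_validate_database_engines values (validate_database_engines values)

-- ===== LEMMAS AND PROOFS =====

-- every canonical engine's lowercase is a self-mapping synonym key, so A's first branch
-- agrees with the dict lookup
theorem stepA_lookup (acc : List String × List String) (value : String) :
    stepA acc value =
      match PySem.Dict.get? DATABASE_ENGINE_SYNONYMS (PySem.Str.lower value) with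
      | some canonical => (acc.1 ++ [canonical], acc.2)
      | none => (acc.1, acc.2 ++ [value]) := by
  unfold stepA
  by_cases h : PySem.Set.contains canonical_engines value = true
  · have hmem : value ∈ canonical_engines := (PySem.Set.contains_iff _ _).mp h
    simp only [canonical_engines, PySem.Set.mem_ofList, List.mem_cons, List.not_mem_nil,
      or_false] at hmem
    rw [h]; simp only [if_true]
    have e1 : DATABASE_ENGINE_SYNONYMS.get? (PySem.Str.lower "MySQL") = some "MySQL" := by decide
    have e2 : DATABASE_ENGINE_SYNONYMS.get? (PySem.Str.lower "PostgreSQL") = some "PostgreSQL" := by decide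
    have e3 : DATABASE_ENGINE_SYNONYMS.get? (PySem.Str.lower "Aurora") = some "Aurora" := by decide
    have e4 : DATABASE_ENGINE_SYNONYMS.get? (PySem.Str.lower "SQL Server") = some "SQL Server" := by decide
    have e5 : DATABASE_ENGINE_SYNONYMS.get? (PySem.Str.lower "Oracle") = some "Oracle" := by decide
    have e6 : DATABASE_ENGINE_SYNONYMS.get? (PySem.Str.lower "MariaDB") = some "MariaDB" := by decide
    rcases hmem with h1 | h1 | h1 | h1 | h1 | h1 <;> subst h1 <;>
      simp only [e1, e2, e3, e4, e5, e6]
  · rw [Bool.not_eq_true] at h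
    rw [h]
    simp only [Bool.false_eq_true, if_false]

-- A's fold accumulates exactly B's two staged passes
theorem foldA_eq (vs : List String) (a b : List String) :
    vs.foldl stepA (a, b) =
      (a ++ vs.filterMap (fun v => PySem.Dict.get? DATABASE_ENGINE_SYNONYMS (PySem.Str.lower v)),
       b ++ vs.filter (fun v => (PySem.Dict.get? DATABASE_ENGINE_SYNONYMS (PySem.Str.lower v)).isNone)) := by
  induction vs generalizing a b with
  | nil => simp
  | cons v vs ih =>
    simp only [List.foldl_cons, stepA_lookup, List.filterMap_cons, List.filter_cons]
    cases h : PySem.Dict.get? DATABASE_ENGINE_SYNONYMS (PySem.Str.lower v) with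
    | some c => simp [ih]
    | none => simp [ih]

-- ===== VERDICT (by name: the statement is the Claim_ definition above) =====
theorem validate_database_engines_spec : Claim_equal_validate_database_engines := by
  intro values _
  unfold Spec_validate_database_engines validate_database_engines validate_database_engines_alt
  match values with
  | none => rfl
  | some vs => simp only [foldA_eq, List.nil_append]
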